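-- pv_equiv track=rewrite | github.com/jb-miles/gay-metadata-agent | src/scrapers/aebn.py | _parse_duration_ms
-- ===== SOURCE A (Python) =====
-- def _parse_duration_ms(value: str | None) -> int | None:
--     if not value:
--         return None
--
--     raw = value.strip().replace("Running Time:", "").strip()
--     if not raw:
--         return None
--
--     try:
--         parts = [int(part) for part in raw.split(":")]
--     except ValueError:
--         return None
--
--     if len(parts) == 2:
--         minutes, seconds = parts
--         hours = 0
--     elif len(parts) == 3:
--         hours, minutes, seconds = parts
--     else:
--         return None
--
--     total_seconds = hours * 3600 + minutes * 60 + seconds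
--     return total_seconds * 1000
-- ===== SOURCE B (Python) =====
-- def _parse_duration_ms(value):
--     if not value:
--         return None
--     raw = value.strip().replace("Running Time:", "").strip()
--     if not raw:
--         return None
--     if ":" not in raw:
--         return None
--     try:
--         seconds = _seconds_from_right(raw, 1)
--     except ValueError:
--         return None
--     if seconds is None:
--         return None
--     return seconds * 1000
--
--
-- def _seconds_from_right(s, unit):
--     # recursive descent from the right: peel the last field off at the last
--     # colon; `unit` is the weight (in seconds) of the rightmost field of `s`.
--     head, sep, last = s.rpartition(":")
--     if not sep:
--         return int(s) * unit
--     if unit >= 3600: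
--         return None  # a fourth field would need a weight beyond hours
--     rest = _seconds_from_right(head, 60 * unit)
--     if rest is None:
--         return None
--     return rest + int(last) * unit
-- ===== Notes on version B (the rewrite author's own statement) =====
-- stated objective: alternative
-- what changed: B never builds the list of fields: after the identical preprocessing it recursively peels the last field off at the last colon (str.rpartition) and accumulates a unit weight 1/60/3600, rejecting a fourth field when the weight would pass hours, instead of A's split-into-a-list, per-length unpacking and h*3600+m*60+s formula.
import Mathlib
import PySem

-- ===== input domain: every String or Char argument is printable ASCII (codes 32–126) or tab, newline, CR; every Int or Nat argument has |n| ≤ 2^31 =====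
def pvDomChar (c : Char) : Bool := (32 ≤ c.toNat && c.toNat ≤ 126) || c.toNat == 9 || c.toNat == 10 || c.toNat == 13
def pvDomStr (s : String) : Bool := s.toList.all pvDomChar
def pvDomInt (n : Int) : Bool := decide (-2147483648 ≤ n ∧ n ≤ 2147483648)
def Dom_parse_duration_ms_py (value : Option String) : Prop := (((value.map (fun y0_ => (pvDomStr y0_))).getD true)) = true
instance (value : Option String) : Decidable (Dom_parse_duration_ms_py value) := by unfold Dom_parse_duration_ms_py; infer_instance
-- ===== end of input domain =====

-- B replaces A's split-into-a-list + per-length unpacking + h*3600+m*60+s formula by a recursive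
-- right-to-left descent (rpartition at the last colon) with a unit-weight accumulator: an
-- alternative decomposition of the same cost.


-- ===== PORT A =====
-- A-side helper: the length-2 / length-3 unpacking and the h*3600 + m*60 + s formula
def pvA_unpack (parts : List Int) : Option Int :=
  match parts with
  | [minutes, seconds] =>
    let hours : Int := 0
    some ((hours * 3600 + minutes * 60 + seconds) * 1000)
  | [hours, minutes, seconds] =>
    some ((hours * 3600 + minutes * 60 + seconds) * 1000)
  | _ => none

-- raw.split(":") with the nonempty one-char separator is exactly Chars.splitOn on the code points;
-- the [int(p) …] comprehension with its except ValueError is mapM ofChars? (left-to-right, none on first failure)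
def parse_duration_ms_py (value : Option String) : Option Int :=
  match value with
  | none => none
  | some v =>
    if v = "" then none
    else
      let raw := PySem.Str.strip (PySem.Str.replace (PySem.Str.strip v) "Running Time:" "")
      if raw = "" then none
      else
        match (PySem.Chars.splitOn raw.toList [':']).mapM PySem.Int.ofChars? with
        | none => none
        | some parts => pvA_unpack parts

-- ===== PORT B =====
-- B-side helper: s.rpartition(":") for the one-char separator, by hand (PySem has no rpartition):
-- returns some (head, last) split at the LAST ':' of s, none when s has no ':' (sep == '') — exact.
def pvRpartition (s : List Char) : Option (List Char × List Char) :=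
  match s with
  | [] => none
  | c :: rest =>
    match pvRpartition rest with
    | some (h, t) => some (c :: h, t)
    | none => if c = ':' then some ([], rest) else none

lemma pvRpartition_none_iff {s : List Char} : pvRpartition s = none ↔ ':' ∉ s := by
  induction s with
  | nil => simp [pvRpartition]
  | cons c rest ih =>
    simp only [pvRpartition]
    cases hr : pvRpartition rest with
    | some p =>
      obtain ⟨h, t⟩ := p
      have : ':' ∈ rest := by
        by_contra hn
        rw [ih.mpr hn] at hr
        simp at hr
      simp [this]
    | none =>
      by_cases hc : c = ':' <;>
        simp [hc, List.mem_cons, ih.mp hr, eq_comm]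

lemma pvRpartition_some_eq {s h t : List Char} (hm : pvRpartition s = some (h, t)) :
    s = h ++ ':' :: t ∧ ':' ∉ t := by
  induction s generalizing h t with
  | nil => simp [pvRpartition] at hm
  | cons c rest ih =>
    simp only [pvRpartition] at hm
    cases hr : pvRpartition rest with
    | some p =>
      obtain ⟨h', t'⟩ := p
      rw [hr] at hm
      simp only [Option.some.injEq, Prod.mk.injEq] at hm
      obtain ⟨h1, h2⟩ := hm
      subst h1; subst h2
      obtain ⟨he, hn⟩ := ih hr
      exact ⟨by simp [he], hn⟩
    | none =>
      rw [hr] at hm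
      by_cases hc : c = ':'
      · subst hc
        simp at hm
        obtain ⟨rfl, rfl⟩ := hm
        exact ⟨by simp, pvRpartition_none_iff.mp hr⟩
      · simp [hc] at hm

lemma pvRpartition_length_lt {s h t : List Char} (hm : pvRpartition s = some (h, t)) :
    h.length < s.length := by
  obtain ⟨he, -⟩ := pvRpartition_some_eq hm
  subst he; simp

-- B-side helper: the recursive right-to-left descent; unit is the weight of the rightmost field
def pvB_seconds (s : List Char) (unit : Int) : Option Int :=
  match hm : pvRpartition s with
  | none => (PySem.Int.ofChars? s).map (· * unit)
  | some (h, t) =>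
    if unit ≥ 3600 then none
    else
      match pvB_seconds h (60 * unit) with
      | none => none
      | some rest => (PySem.Int.ofChars? t).map (fun v => rest + v * unit)
termination_by s.length
decreasing_by exact pvRpartition_length_lt hm

-- the try/except ValueError around the descent and the None-propagation both become none here
def parse_duration_ms_py_alt (value : Option String) : Option Int :=
  match value with
  | none => none
  | some v =>
    if v = "" then none
    else
      let raw := PySem.Str.strip (PySem.Str.replace (PySem.Str.strip v) "Running Time:" "")
      if raw = "" then none
      else
        if PySem.Str.isIn ":" raw = false then none
        else
          match pvB_seconds raw.toList 1 with
          | none => none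
          | some seconds => some (seconds * 1000)

-- ===== PRECONDITION & SPEC =====
def Spec_parse_duration_ms_py (value : Option String) (out : Option Int) : Prop := out = parse_duration_ms_py_alt value
instance (value : Option String) (out : Option Int) : Decidable (Spec_parse_duration_ms_py value out) := by unfold Spec_parse_duration_ms_py; infer_instance

-- ===== CLAIM (what is proved, stated in full; the proofs are below) =====
def Claim_equal_parse_duration_ms_py : Prop := ∀ (value : Option String), Dom_parse_duration_ms_py value → Spec_parse_duration_ms_py value (parse_duration_ms_py value)

-- ===== LEMMAS AND PROOFS =====

-- a simple structural split at ':' that characterises PySem.Chars.splitOn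
def pvSplit : List Char → List (List Char)
  | [] => [[]]
  | c :: rest =>
    if c = ':' then [] :: pvSplit rest
    else (c :: (pvSplit rest).headI) :: (pvSplit rest).tail

lemma pvSplit_ne_nil (l : List Char) : pvSplit l ≠ [] := by
  cases l with
  | nil => simp [pvSplit]
  | cons c rest => simp [pvSplit]; split <;> simp

lemma splitOn_go_eq (l : List Char) : ∀ (fuel : Nat) (cur : List Char) (acc : List (List Char)),
    l.length < fuel →
    PySem.Chars.splitOn.go [':'] fuel l cur acc
      = acc.reverse ++ ((cur.reverse ++ (pvSplit l).headI) :: (pvSplit l).tail) := by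
  induction l with
  | nil =>
    intro fuel cur acc hf
    match fuel, hf with
    | fuel + 1, _ => simp [PySem.Chars.splitOn.go, pvSplit]
  | cons c rest ih =>
    intro fuel cur acc hf
    match fuel, hf with
    | fuel + 1, hf =>
      have hr : rest.length < fuel := by simp at hf; omega
      by_cases hc : c = ':'
      · have : PySem.Chars.splitOn.go [':'] (fuel + 1) (c :: rest) cur acc
            = PySem.Chars.splitOn.go [':'] fuel rest [] (cur.reverse :: acc) := by
          simp [PySem.Chars.splitOn.go, List.isPrefixOf, hc]
        rw [this, ih fuel [] (cur.reverse :: acc) hr]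
        cases hps : pvSplit rest with
        | nil => exact absurd hps (pvSplit_ne_nil rest)
        | cons x xs => simp [pvSplit, hc, hps]
      · have : PySem.Chars.splitOn.go [':'] (fuel + 1) (c :: rest) cur acc
            = PySem.Chars.splitOn.go [':'] fuel rest (c :: cur) acc := by
          simp only [PySem.Chars.splitOn.go, List.isPrefixOf]
          have : (':' == c) = false := by simp; exact fun h => hc h.symm
          simp [this]
        rw [this, ih fuel (c :: cur) acc hr]
        simp [pvSplit, hc]
  
lemma splitOn_eq_pvSplit (l : List Char) : PySem.Chars.splitOn l [':'] = pvSplit l := by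
  have h := splitOn_go_eq l (l.length + 1) [] [] (by omega)
  simp only [PySem.Chars.splitOn] at *
  rw [h]
  cases hps : pvSplit l with
  | nil => exact absurd hps (pvSplit_ne_nil l)
  | cons x xs => simp

lemma pvSplit_no_colon {l : List Char} (h : ':' ∉ l) : pvSplit l = [l] := by
  induction l with
  | nil => rfl
  | cons c rest ih =>
    simp [List.mem_cons] at h
    simp only [pvSplit]
    rw [if_neg (fun hh => h.1 hh.symm), ih h.2]
    simp

lemma pvSplit_append_colon {t : List Char} (ht : ':' ∉ t) (h : List Char) :
    pvSplit (h ++ ':' :: t) = pvSplit h ++ [t] := by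
  induction h with
  | nil => simp [pvSplit, pvSplit_no_colon ht]
  | cons c h' ih =>
    by_cases hc : c = ':'
    · simp [pvSplit, hc, ih]
    · have hne := pvSplit_ne_nil h'
      cases hps : pvSplit h' with
      | nil => exact absurd hps hne
      | cons x xs =>
        simp [pvSplit, hc, ih, hps]

lemma mapM_length {l : List (List Char)} {parts : List Int}
    (h : l.mapM PySem.Int.ofChars? = some parts) : parts.length = l.length := by
  induction l generalizing parts with
  | nil =>
    have h' : (some ([] : List Int)) = some parts := h
    simp at h'
    simp [← h']
  | cons x xs ih =>
    rw [List.mapM_cons] at h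
    cases hx : PySem.Int.ofChars? x with
    | none => rw [hx] at h; simp at h
    | some v =>
      rw [hx] at h
      cases hxs : xs.mapM PySem.Int.ofChars? with
      | none => rw [hxs] at h; simp at h
      | some vs =>
        rw [hxs] at h
        simp at h
        simp [← h, ih hxs]

lemma pvA_unpack_long {parts : List Int} (h : 4 ≤ parts.length) : pvA_unpack parts = none := by
  match parts, h with
  | a :: b :: c :: d :: rest, _ => rfl

lemma colon_mem_isIn {l : List Char} (h : ':' ∈ l) : PySem.Chars.isIn [':'] l = true := by
  rw [PySem.Chars.isIn_iff_infix]
  obtain ⟨l1, l2, rfl⟩ := List.mem_iff_append.mp h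
  exact ⟨l1, l2, by simp⟩

lemma colon_not_mem_isIn {l : List Char} (h : ':' ∉ l) : PySem.Chars.isIn [':'] l = false := by
  rw [PySem.Chars.isIn_eq_false_iff]
  intro ⟨l1, l2, he⟩
  exact h (by rw [← he]; simp)

-- the core: A's split-parse-unpack equals B's right-to-left descent, on the raw field string
lemma pv_core (l : List Char) :
    (match (PySem.Chars.splitOn l [':']).mapM PySem.Int.ofChars? with
     | none => none
     | some parts => pvA_unpack parts)
    = (if PySem.Chars.isIn [':'] l = false then none
       else match pvB_seconds l 1 with
            | none => none
            | some seconds => some (seconds * 1000)) := by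
  rw [splitOn_eq_pvSplit]
  cases hm : pvRpartition l with
  | none =>
    -- no colon: A gets one field (unpack fails), B's membership guard fires
    have hnc : ':' ∉ l := pvRpartition_none_iff.mp hm
    rw [pvSplit_no_colon hnc, colon_not_mem_isIn hnc]
    cases hx : PySem.Int.ofChars? l <;> simp [List.mapM_cons, hx, pvA_unpack]
  | some p =>
    obtain ⟨h, t⟩ := p
    obtain ⟨rfl, hnt⟩ := pvRpartition_some_eq hm
    have hmem : (':' : Char) ∈ h ++ ':' :: t := by simp
    rw [colon_mem_isIn hmem, pvSplit_append_colon hnt]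
    rw [pvB_seconds]; rw [hm]
    simp only [show ¬((1:Int) ≥ 3600) by norm_num, ite_false]
    cases hm2 : pvRpartition h with
    | none =>
      -- two fields
      have hnc2 : ':' ∉ h := pvRpartition_none_iff.mp hm2
      rw [pvSplit_no_colon hnc2]
      rw [pvB_seconds]; rw [hm2]
      cases hx : PySem.Int.ofChars? h with
      | none => simp [List.mapM_cons, hx]
      | some a =>
        cases hy : PySem.Int.ofChars? t with
        | none => simp [List.mapM_cons, hx, hy]
        | some b => simp [List.mapM_cons, hx, hy, pvA_unpack]
    | some p2 =>
      obtain ⟨h2, t2⟩ := p2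
      obtain ⟨rfl, hnt2⟩ := pvRpartition_some_eq hm2
      rw [pvSplit_append_colon hnt2]
      rw [pvB_seconds]; rw [hm2]
      simp only [if_neg (show ¬((60:Int) ≥ 3600) by norm_num)]
      cases hm3 : pvRpartition h2 with
      | none =>
        -- three fields
        have hnc3 : ':' ∉ h2 := pvRpartition_none_iff.mp hm3
        rw [pvSplit_no_colon hnc3]
        rw [pvB_seconds]; rw [hm3]
        cases hx : PySem.Int.ofChars? h2 with
        | none => simp [List.mapM_cons, hx]
        | some a =>
          cases hy : PySem.Int.ofChars? t2 with
          | none => simp [List.mapM_cons, hx, hy]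
          | some b =>
            cases hz : PySem.Int.ofChars? t with
            | none => simp [List.mapM_cons, hx, hy, hz]
            | some c => simp [List.mapM_cons, hx, hy, hz, pvA_unpack]
      | some p3 =>
        -- four or more fields: A's unpack has no branch, B's weight cap fires
        obtain ⟨h3, t3⟩ := p3
        obtain ⟨rfl, hnt3⟩ := pvRpartition_some_eq hm3
        rw [pvB_seconds]; rw [hm3]
        simp only [if_pos (show ((3600:Int) ≥ 3600) by norm_num)]
        cases hall : (pvSplit (h3 ++ ':' :: t3) ++ [t2] ++ [t]).mapM PySem.Int.ofChars? with
        | none => rfl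
        | some parts =>
          have hlen : 4 ≤ parts.length := by
            rw [mapM_length hall]
            have hpos : 0 < (pvSplit h3).length :=
              List.length_pos_of_ne_nil (pvSplit_ne_nil h3)
            rw [pvSplit_append_colon hnt3]
            simp [List.length_append]
            omega
          simp [pvA_unpack_long hlen]

-- ===== VERDICT (by name: the statement is the Claim_ definition above) =====
theorem parse_duration_ms_py_spec : Claim_equal_parse_duration_ms_py := by
  intro value _
  unfold Spec_parse_duration_ms_py
  cases value with
  | none => rfl
  | some v =>
    simp only [parse_duration_ms_py, parse_duration_ms_py_alt]
    by_cases h1 : v = ""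
    · simp [h1]
    · by_cases h2 : PySem.Str.strip (PySem.Str.replace (PySem.Str.strip v) "Running Time:" "") = ""
      · simp [h1, h2]
      · simp only [if_neg h1, if_neg h2]
        rw [pv_core (PySem.Str.strip (PySem.Str.replace (PySem.Str.strip v) "Running Time:" "")).toList]
        rfl
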